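-- pv_equiv track=rewrite | github.com/acellison/pyodex | odex/partition.py | equipartition
-- ===== SOURCE A (Python) =====
-- def _try_partition(a, k, maxheight):
--     """Partition an array into k bins
--        :param a: array of values to partition.  must be sorted descending
--        :param k: number of bins to partition the values
--        :param maxheight: maximum bin height
--     """
--     n = len(a)
--     bins = [[] for ii in range(k)]
--     sums = [0]*k
--     used = [0]*n
--
--     for ii in range(k):
--         for jj in range(n):
--             if not used[jj]:
--                 tmp = sums[ii]+a[jj]
--                 if tmp <= maxheight:
--                     used[jj] = 1
--                     sums[ii] = tmp
--                     bins[ii].append(a[jj])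
--     return all(used), bins
--
-- def equipartition(a):
--     """Partition an array into the fewest bins such that the
--        sum of each bin does not exceed the max element of the array
--        :param a: array of values to partition
--     """
--     a = sorted(a, reverse=True)
--     maxheight = a[0]
--
--     def ceildiv(a, b):
--         return -(-a // b)
--     first = ceildiv(sum(a), maxheight)
--     for k in range(first,len(a)+1):
--         fits, bins = _try_partition(a, k, maxheight)
--         if fits:
--             return bins
-- ===== SOURCE B (Python) =====
-- def _greedy(a, k, m):
--     """Fill k bins greedily from the remaining elements; return (bins, leftover)."""
--     bins = []
--     rem = list(a)
--     for _ in range(k):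
--         s = 0
--         b = []
--         nxt = []
--         for v in rem:
--             if s + v <= m:
--                 s += v
--                 b.append(v)
--             else:
--                 nxt.append(v)
--         bins.append(b)
--         rem = nxt
--     return bins, rem
--
-- def equipartition(a):
--     a = sorted(a, reverse=True)
--     m = a[0]
--     lo = -(-sum(a) // m)
--     hi = len(a)
--     if lo > hi:
--         return None  # infeasible degenerate case (negative max); A returns None here too
--     while lo < hi:
--         mid = (lo + hi) // 2
--         if not _greedy(a, mid, m)[1]:
--             hi = mid
--         else:
--             lo = mid + 1
--     return _greedy(a, lo, m)[0]
-- ===== Notes on version B (the rewrite author's own statement) =====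
-- stated objective: faster
-- what changed: A linearly tries every bin count k from the lower bound upward with an O(n^2) flag-array greedy; B binary-searches the minimal feasible k (greedy feasibility is monotone in k) and runs the greedy as a single pass over a shrinking remainder list instead of rescanning a used-flag array.
-- outside the precondition, e.g. on equipartition([-2147483648, -1]): A returns None, B returns None
import Mathlib
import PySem

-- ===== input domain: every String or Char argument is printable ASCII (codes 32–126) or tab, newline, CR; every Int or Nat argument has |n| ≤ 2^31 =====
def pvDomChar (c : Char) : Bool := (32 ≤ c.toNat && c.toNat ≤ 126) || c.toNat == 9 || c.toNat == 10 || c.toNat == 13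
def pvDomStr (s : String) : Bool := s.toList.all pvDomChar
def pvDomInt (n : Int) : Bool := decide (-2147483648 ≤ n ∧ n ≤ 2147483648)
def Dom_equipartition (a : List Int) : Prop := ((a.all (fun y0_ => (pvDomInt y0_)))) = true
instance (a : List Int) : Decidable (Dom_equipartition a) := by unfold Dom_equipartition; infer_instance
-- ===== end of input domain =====

-- B replaces A's linear search over the bin count by a binary search (greedy feasibility is
-- monotone in k) and runs the greedy over a shrinking remainder list instead of a used-flag array.

-- ===== PORT A =====
-- inner loop of _try_partition: 'for jj in range(n): if not used[jj]: …' walking a and used in lockstep;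
-- returns (new used flags, bins[ii] as appended, final sums[ii])
def innerA (m : Int) : List Int → List Int → Int → List Int × List Int × Int
  | v :: vs, f :: fs, s =>
      if f = 0 then
        if s + v ≤ m then
          let r := innerA m vs fs (s + v); (1 :: r.1, v :: r.2.1, r.2.2)
        else
          let r := innerA m vs fs s; (0 :: r.1, r.2.1, r.2.2)
      else
        let r := innerA m vs fs s; (f :: r.1, r.2.1, r.2.2)
  | _, _, s => ([], [], s)   -- unreachable: flags has length n

-- outer loop 'for ii in range(k)': each bin starts with sums[ii] = 0
def binsA (m : Int) (vals : List Int) : Nat → List Int → List (List Int) × List Int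
  | 0, flags => ([], flags)
  | Nat.succ k, flags =>
      let r := innerA m vals flags 0
      let rest := binsA m vals k r.1
      (r.2.1 :: rest.1, rest.2)

def tryPartitionA (a : List Int) (k : Int) (m : Int) : Bool × List (List Int) :=
  let r := binsA m a k.toNat (List.replicate a.length 0)   -- range(k) is empty for k ≤ 0
  (r.2.all (fun f => f != 0), r.1)                         -- all(used): truthiness = nonzero

def equipartition (a : List Int) : List (List Int) :=
  let s := PySem.List.sorted a (fun x => x) true
  match PySem.List.pyGet? s 0 with
  | none => []                                             -- a[0]: IndexError (outside Pre_)
  | some m =>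
    if m = 0 then []                                       -- ceildiv: ZeroDivisionError (outside Pre_)
    else
      let first := -(PySem.Int.floordiv (-(s.sum)) m)
      let res := (PySem.List.pyRange first ((s.length : Int) + 1) 1).findSome? (fun k =>
        let r := tryPartitionA s k m
        if r.1 then some r.2 else none)
      res.getD []                                          -- loop falls through: Python returns None (outside Pre_)

-- ===== PORT B =====
-- one greedy bin from the remaining elements: returns (bin, leftover)
def fillB (m : Int) : Int → List Int → List Int × List Int
  | _, [] => ([], [])
  | s, v :: vs =>
      if s + v ≤ m then
        let r := fillB m (s + v) vs; (v :: r.1, r.2)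
      else
        let r := fillB m s vs; (r.1, v :: r.2)

-- _greedy: k bins, threading the leftover
def greedyB (m : Int) : Nat → List Int → List (List Int) × List Int
  | 0, rem => ([], rem)
  | Nat.succ k, rem =>
      let f := fillB m 0 rem
      let rest := greedyB m k f.2
      (f.1 :: rest.1, rest.2)

-- 'while lo < hi' with fuel (hi-lo).toNat: the interval shrinks each iteration, so the fuel suffices
def bsearchB (m : Int) (s : List Int) : Nat → Int → Int → Int
  | 0, lo, _ => lo
  | Nat.succ fuel, lo, hi =>
      if lo < hi then
        let mid := PySem.Int.floordiv (lo + hi) 2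
        if ((greedyB m mid.toNat s).2.isEmpty) then bsearchB m s fuel lo mid
        else bsearchB m s fuel (mid + 1) hi
      else lo

def equipartition_alt (a : List Int) : List (List Int) :=
  let s := PySem.List.sorted a (fun x => x) true
  match PySem.List.pyGet? s 0 with
  | none => []
  | some m =>
    if m = 0 then []
    else
      let lo := -(PySem.Int.floordiv (-(s.sum)) m)
      let hi := (s.length : Int)
      if hi < lo then []                                   -- Python returns None (outside Pre_)
      else
        let k := bsearchB m s (hi - lo).toNat lo hi
        (greedyB m k.toNat s).1

-- ===== PRECONDITION & SPEC =====
-- max of a nonempty list (0 is a dummy for [])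
def pvMaxOf : List Int → Int
  | [] => 0
  | x :: t => t.foldl max x

-- Pre_ excludes the empty list (a[0] raises IndexError), max element 0 (ceildiv raises
-- ZeroDivisionError) and the degenerate negative-max inputs whose initial bin estimate
-- ceil(sum/max) exceeds len(a): there A's loop body never runs and A returns None, not a list.
def Pre_equipartition (a : List Int) : Prop :=
  a ≠ [] ∧ pvMaxOf a ≠ 0 ∧ -(PySem.Int.floordiv (-(a.sum)) (pvMaxOf a)) ≤ (a.length : Int)
instance (a : List Int) : Decidable (Pre_equipartition a) := by unfold Pre_equipartition; infer_instance

def pvWitness_equipartition : List Int := ([3, 1, 2])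

def Spec_equipartition (a : List Int) (out : List (List Int)) : Prop := out = equipartition_alt a
instance (a : List Int) (out : List (List Int)) : Decidable (Spec_equipartition a out) := by unfold Spec_equipartition; infer_instance

-- ===== CLAIM (what is proved, stated in full; the proofs are below) =====
def Claim_equal_equipartition : Prop := ∀ (a : List Int), Dom_equipartition a → Pre_equipartition a → Spec_equipartition a (equipartition a)

-- ===== LEMMAS AND PROOFS =====

-- the elements of vs whose flag is still 0, in order (proof-only view of A's used array)
def maskL : List Int → List Int → List Int
  | v :: vs, f :: fs => if f = 0 then v :: maskL vs fs else maskL vs fs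
  | _, _ => []

lemma maskL_replicate (vs : List Int) : maskL vs (List.replicate vs.length 0) = vs := by
  induction vs with
  | nil => rfl
  | cons v vs ih => simp [maskL, List.replicate, ih]

lemma maskL_eq_nil_iff (vs flags : List Int) (h : flags.length = vs.length) :
    (maskL vs flags = []) ↔ (flags.all (fun f => f != 0) = true) := by
  induction vs generalizing flags with
  | nil => cases flags <;> simp [maskL] at h ⊢
  | cons v vs ih =>
    cases flags with
    | nil => simp at h
    | cons f fs =>
      simp only [List.length_cons, Nat.succ.injEq] at h
      by_cases hf : f = 0 <;> simp [maskL, hf, ih fs h]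

lemma inner_bridge (m : Int) (vs : List Int) :
    ∀ (flags : List Int) (s : Int), flags.length = vs.length →
      (innerA m vs flags s).2.1 = (fillB m s (maskL vs flags)).1 ∧
      maskL vs (innerA m vs flags s).1 = (fillB m s (maskL vs flags)).2 ∧
      (innerA m vs flags s).1.length = vs.length := by
  induction vs with
  | nil => intro flags s h; cases flags <;> simp_all [innerA, maskL, fillB]
  | cons v vs ih =>
    intro flags s h
    cases flags with
    | nil => simp at h
    | cons f fs =>
      simp only [List.length_cons, Nat.succ.injEq] at h
      by_cases hf : f = 0
      · by_cases hle : s + v ≤ m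
        · have := ih fs (s + v) h
          simp [innerA, maskL, fillB, hf, hle, this.1, this.2.1, this.2.2]
        · have := ih fs s h
          simp [innerA, maskL, fillB, hf, hle, this.1, this.2.1, this.2.2]
      · have := ih fs s h
        simp [innerA, maskL, hf, this.1, this.2.1, this.2.2]

lemma bins_bridge (m : Int) (vals : List Int) :
    ∀ (k : Nat) (flags : List Int), flags.length = vals.length →
      (binsA m vals k flags).1 = (greedyB m k (maskL vals flags)).1 ∧
      maskL vals (binsA m vals k flags).2 = (greedyB m k (maskL vals flags)).2 ∧
      (binsA m vals k flags).2.length = vals.length := by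
  intro k
  induction k with
  | zero => intro flags h; simp [binsA, greedyB, h]
  | succ k ih =>
    intro flags h
    have hi := inner_bridge m vals flags 0 h
    have hb := ih (innerA m vals flags 0).1 hi.2.2
    simp only [binsA, greedyB]
    exact ⟨by rw [hi.1, hb.1, hi.2.1], by rw [hb.2.1, hi.2.1], hb.2.2⟩

lemma tryA_eq (m : Int) (s : List Int) (k : Int) :
    tryPartitionA s k m = ((greedyB m k.toNat s).2.isEmpty, (greedyB m k.toNat s).1) := by
  have h := bins_bridge m s k.toNat (List.replicate s.length 0) (by simp)
  rw [maskL_replicate] at h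
  have hfits : ((binsA m s k.toNat (List.replicate s.length 0)).2.all (fun f => f != 0))
      = (greedyB m k.toNat s).2.isEmpty := by
    apply Bool.eq_iff_iff.mpr
    rw [List.isEmpty_iff, ← maskL_eq_nil_iff s _ h.2.2, h.2.1]
  simp only [tryPartitionA]
  exact Prod.ext hfits h.1

lemma greedy_leftover_nil (m : Int) (k : Nat) : (greedyB m k []).2 = [] := by
  induction k with
  | zero => rfl
  | succ k ih => simpa [greedyB, fillB] using ih

lemma fill_leftover_sublist (m : Int) (l : List Int) :
    ∀ s, (fillB m s l).2.Sublist l := by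
  induction l with
  | nil => intro s; simp [fillB]
  | cons v vs ih =>
    intro s
    by_cases hle : s + v ≤ m
    · simpa [fillB, hle] using (ih (s + v)).cons v
    · simpa [fillB, hle] using (ih s).cons₂ v

lemma greedy_mono_succ (m : Int) : ∀ (k : Nat) (rem : List Int),
    (greedyB m k rem).2 = [] → (greedyB m (k + 1) rem).2 = [] := by
  intro k
  induction k with
  | zero =>
    intro rem h
    simp only [greedyB] at h ⊢
    simp [h, fillB]
  | succ k ih =>
    intro rem h
    simp only [greedyB] at h ⊢
    exact ih _ h

lemma greedy_mono (m : Int) (j k : Nat) (h : j ≤ k) (rem : List Int)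
    (hj : (greedyB m j rem).2 = []) : (greedyB m k rem).2 = [] := by
  induction k with
  | zero => have : j = 0 := Nat.le_zero.mp h; rwa [← this]
  | succ k ih =>
    rcases Nat.lt_or_ge j (k + 1) with hlt | hge
    · exact greedy_mono_succ m k rem (ih (Nat.lt_succ_iff.mp hlt))
    · have : j = k + 1 := Nat.le_antisymm h hge
      rwa [← this]

lemma greedy_total (m : Int) : ∀ (k : Nat) (rem : List Int), rem.length ≤ k →
    (∀ x ∈ rem, x ≤ m) → (greedyB m k rem).2 = [] := by
  intro k
  induction k with
  | zero => intro rem h _; simp [List.eq_nil_of_length_eq_zero (Nat.le_zero.mp h), greedyB]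
  | succ k ih =>
    intro rem h hle
    cases rem with
    | nil => exact greedy_leftover_nil m (k + 1)
    | cons v vs =>
      have hv : 0 + v ≤ m := by simpa using hle v (by simp)
      simp only [greedyB, fillB, hv, if_pos]
      apply ih
      · have := (fill_leftover_sublist m vs (0 + v)).length_le
        simp only [List.length_cons] at h
        omega
      · intro x hx
        exact hle x (List.mem_cons_of_mem v ((fill_leftover_sublist m vs (0 + v)).mem hx))

lemma lin_found (P : Int → Bool) (g : Int → List (List Int)) (b K : Int)
    (hKb : K < b) (hK : P K = true) :
    ∀ (d : Nat) (lo : Int), lo ≤ K → (K - lo).toNat = d →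
      (∀ j, lo ≤ j → j < K → P j = false) →
      ((PySem.List.pyRange lo b 1).findSome? (fun k => if P k then some (g k) else none))
        = some (g K) := by
  intro d
  induction d with
  | zero =>
    intro lo hloK hd _
    have : lo = K := by omega
    subst this
    rw [PySem.List.pyRange_one_cons (by omega)]
    simp [List.findSome?, hK]
  | succ d ih =>
    intro lo hloK hd hfalse
    have hlt : lo < K := by omega
    rw [PySem.List.pyRange_one_cons (by omega)]
    have h0 : P lo = false := hfalse lo le_rfl hlt
    simp only [List.findSome?, h0, Bool.false_eq_true, if_false]
    exact ih (lo + 1) (by omega) (by omega) (fun j hj1 hj2 => hfalse j (by omega) hj2)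

lemma bsearch_eq (m : Int) (s : List Int) (K : Int)
    (hup : ∀ j, K ≤ j → (greedyB m j.toNat s).2.isEmpty = true) :
    ∀ (fuel : Nat) (lo hi : Int), lo ≤ K → K ≤ hi → (hi - lo).toNat ≤ fuel →
      (∀ j, lo ≤ j → j < K → (greedyB m j.toNat s).2.isEmpty = false) →
      bsearchB m s fuel lo hi = K := by
  intro fuel
  induction fuel with
  | zero =>
    intro lo hi h1 h2 h3 _
    have : lo = K := by omega
    simpa [bsearchB] using this
  | succ fuel ih =>
    intro lo hi h1 h2 h3 hfalse
    by_cases hlh : lo < hi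
    · have hmidlo : lo ≤ PySem.Int.floordiv (lo + hi) 2 :=
        (PySem.Int.le_floordiv_iff_mul_le (by norm_num)).mpr (by omega)
      have hmidhi : PySem.Int.floordiv (lo + hi) 2 < hi :=
        (PySem.Int.floordiv_lt_iff_lt_mul (by norm_num)).mpr (by omega)
      set mid := PySem.Int.floordiv (lo + hi) 2 with hmid
      simp only [bsearchB, if_pos hlh, ← hmid]
      by_cases hp : (greedyB m mid.toNat s).2.isEmpty = true
      · have hKmid : K ≤ mid := by
          by_contra hc
          have := hfalse mid hmidlo (by omega)
          rw [hp] at this; exact Bool.true_eq_false.mp this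
        rw [if_pos hp]
        exact ih lo mid h1 hKmid (by omega) hfalse
      · have hmidK : mid < K := by
          by_contra hc
          exact hp (hup mid (by omega))
        rw [if_neg hp]
        exact ih (mid + 1) hi (by omega) h2 (by omega)
          (fun j hj1 hj2 => hfalse j (by omega) hj2)
    · have : lo = K := by omega
      simpa [bsearchB, hlh] using this

-- ===== VERDICT (by name: the statement is the Claim_ definition above) =====
theorem equipartition_spec : Claim_equal_equipartition := by
  intro a _hdom hpre
  obtain ⟨hne, hm0, hfirst⟩ := hpre
  unfold Spec_equipartition equipartition equipartition_alt
  cases hs : PySem.List.sorted a (fun x => x) true with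
  | nil => exact absurd ((PySem.List.sorted_eq_nil_iff a (fun x => x) true).mp hs) hne
  | cons x t =>
    have hperm : (x :: t).Perm a := hs ▸ PySem.List.sorted_perm a (fun x => x) true
    have hub : ∀ y ∈ a, y ≤ x := by
      have := PySem.List.key_head_sorted_rev_ge a (fun x => x) hs
      simpa using this
    have hxa : x ∈ a := hperm.mem_iff.mp (by simp)
    have hmax : pvMaxOf a = x := by
      cases a with
      | nil => exact absurd rfl hne
      | cons b bs =>
        have hpv : pvMaxOf (b :: bs) = bs.foldl max b := rfl
        rw [hpv]
        apply le_antisymm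
        · rcases PySem.List.foldl_max_mem bs b with h | h
          · rw [h]; exact hub b List.mem_cons_self
          · exact hub _ (List.mem_cons_of_mem b h)
        · rcases List.mem_cons.mp hxa with rfl | h
          · exact (PySem.List.le_foldl_max bs x).1
          · exact (PySem.List.le_foldl_max bs b).2 x h
    have hsum : (x :: t).sum = a.sum := hperm.sum_eq
    have hlen : (x :: t).length = a.length := by
      rw [← hs]; exact PySem.List.length_sorted a (fun x => x) true
    have hget : PySem.List.pyGet? (x :: t) 0 = some x := by simp [PySem.List.pyGet?, PySem.List.pyIdx?]
    have hx0 : x ≠ 0 := hmax ▸ hm0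
    simp only [hget, hx0, if_false]
    have hfn : -(PySem.Int.floordiv (-((x :: t).sum)) x) ≤ ((x :: t).length : Int) := by
      rw [hsum, hlen, ← hmax]
      exact hfirst
    generalize hF : -(PySem.Int.floordiv (-((x :: t).sum)) x) = first at hfn ⊢
    generalize hN : ((x :: t).length : Int) = n at hfn ⊢
    have hn1 : 1 ≤ n := by rw [← hN]; simp
    have hntn : n.toNat = (x :: t).length := by omega
    have hPn : (greedyB x n.toNat (x :: t)).2.isEmpty = true := by
      rw [List.isEmpty_iff, hntn]
      exact greedy_total x (x :: t).length (x :: t) le_rfl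
        (fun y hy => hub y (hperm.mem_iff.mp hy))
    have hex : ∃ d : Nat, (greedyB x (first + (d : Int)).toNat (x :: t)).2.isEmpty = true := by
      refine ⟨(n - first).toNat, ?_⟩
      have h1 : first + (((n - first).toNat : Nat) : Int) = n := by omega
      rw [h1]; exact hPn
    set d0 := Nat.find hex with hd0
    set K : Int := first + (d0 : Int) with hKdef
    have hPK : (greedyB x K.toNat (x :: t)).2.isEmpty = true := Nat.find_spec hex
    have hKn : K ≤ n := by
      have := Nat.find_min' hex (m := (n - first).toNat) (by
        have h1 : first + (((n - first).toNat : Nat) : Int) = n := by omega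
        rw [h1]; exact hPn)
      omega
    have hfirstK : first ≤ K := by omega
    have hK1 : 0 < K := by
      by_contra hc
      have h0 : K.toNat = 0 := by omega
      rw [h0] at hPK
      simp [greedyB] at hPK
    have hmin : ∀ j, first ≤ j → j < K → (greedyB x j.toNat (x :: t)).2.isEmpty = false := by
      intro j h1 h2
      have hj : j = first + (((j - first).toNat : Nat) : Int) := by omega
      by_contra hc
      have htrue : (greedyB x (first + (((j - first).toNat : Nat) : Int)).toNat (x :: t)).2.isEmpty = true := by
        rw [← hj]; revert hc
        cases (greedyB x j.toNat (x :: t)).2.isEmpty <;> simp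
      exact absurd htrue (Nat.find_min hex (by omega))
    have hup : ∀ j, K ≤ j → (greedyB x j.toNat (x :: t)).2.isEmpty = true := by
      intro j hj
      rw [List.isEmpty_iff]
      exact greedy_mono x K.toNat j.toNat (by omega) _ (List.isEmpty_iff.mp hPK)
    have hA : ((PySem.List.pyRange first (n + 1) 1).findSome? (fun k =>
        let r := tryPartitionA (x :: t) k x
        if r.1 then some r.2 else none)).getD []
        = (greedyB x K.toNat (x :: t)).1 := by
      have hfun : (fun k : Int =>
          let r := tryPartitionA (x :: t) k x
          if r.1 then some r.2 else none)
          = (fun k : Int => if (greedyB x k.toNat (x :: t)).2.isEmpty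
              then some ((greedyB x k.toNat (x :: t)).1) else none) := by
        funext k; rw [tryA_eq]
      rw [hfun, lin_found (fun k : Int => (greedyB x k.toNat (x :: t)).2.isEmpty)
        (fun k : Int => (greedyB x k.toNat (x :: t)).1) (n + 1) K (by omega) hPK
        ((K - first).toNat) first hfirstK rfl hmin]
      rfl
    have hB : bsearchB x (x :: t) (n - first).toNat first n = K :=
      bsearch_eq x (x :: t) K hup (n - first).toNat first n hfirstK hKn le_rfl hmin
    rw [if_neg (show ¬ n < first by omega)]
    simp only [hB]
    exact hA
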